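-- pv_equiv track=rewrite | github.com/bartosz-kozlowski/AiSD | ZZZZZ+_A-KSZ.py | AKSZ
-- ===== SOURCE A (Python) =====
-- def AKSZ(długość):
--     ciąg = []
--     punkt_szczytowy = długość // 2 # punkt w którym zaczyna się malejący fragment
--     wartość = 1 # wartość początkowa
--     for i in range(długość):
--         ciąg.append(wartość)
--         if i < punkt_szczytowy:
--             wartość += 1
--         else:
--             wartość -= 1
--     return ciąg
-- ===== SOURCE B (Python) =====
-- def AKSZ(długość):
--     punkt = długość // 2
--     return [i + 1 if i < punkt else 2 * punkt + 1 - i for i in range(długość)]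
-- ===== Notes on version B (the rewrite author's own statement) =====
-- stated objective: simpler
-- what changed: Replaces the accumulator loop with a running 'wartość' variable by a stateless list comprehension computing each element from its index by a closed-form formula (i+1 rising, 2*peak+1-i falling).
import Mathlib
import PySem

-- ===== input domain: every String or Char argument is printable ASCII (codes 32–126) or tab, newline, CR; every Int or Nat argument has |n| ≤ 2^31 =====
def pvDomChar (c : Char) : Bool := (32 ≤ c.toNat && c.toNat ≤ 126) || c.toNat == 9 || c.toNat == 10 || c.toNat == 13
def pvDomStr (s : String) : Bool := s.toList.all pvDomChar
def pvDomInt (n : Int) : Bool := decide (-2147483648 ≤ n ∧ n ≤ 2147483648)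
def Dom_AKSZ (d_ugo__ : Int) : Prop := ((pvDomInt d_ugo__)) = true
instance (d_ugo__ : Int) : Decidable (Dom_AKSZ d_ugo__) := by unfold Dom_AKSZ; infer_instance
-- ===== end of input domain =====

-- ===== PORT A =====
-- Accumulator loop: state (ciąg, wartość); append then step wartość up or down.
def AKSZ (d_ugo__ : Int) : List Int :=
  let punkt_szczytowy := PySem.Int.floordiv d_ugo__ 2
  let st := (PySem.List.pyRange 0 d_ugo__ 1).foldl
    (fun (st : List Int × Int) i =>
      (st.1 ++ [st.2], if i < punkt_szczytowy then st.2 + 1 else st.2 - 1))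
    ([], 1)
  st.1

-- ===== PORT B =====
-- Stateless comprehension: each element a closed-form function of its index.
def AKSZ_alt (d_ugo__ : Int) : List Int :=
  let punkt := PySem.Int.floordiv d_ugo__ 2
  (PySem.List.pyRange 0 d_ugo__ 1).map
    (fun i => if i < punkt then i + 1 else 2 * punkt + 1 - i)

-- ===== PRECONDITION & SPEC =====
def Spec_AKSZ (d_ugo__ : Int) (out : List Int) : Prop := out = AKSZ_alt d_ugo__
instance (d_ugo__ : Int) (out : List Int) : Decidable (Spec_AKSZ d_ugo__ out) := by unfold Spec_AKSZ; infer_instance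

-- ===== CLAIM (what is proved, stated in full; the proofs are below) =====
def Claim_equal_AKSZ : Prop := ∀ (d_ugo__ : Int), Dom_AKSZ d_ugo__ → Spec_AKSZ d_ugo__ (AKSZ d_ugo__)

-- ===== LEMMAS AND PROOFS =====

-- closed form for the element at index i, and for the running wartość after i steps
def pvG (p i : Int) : Int := if i < p then i + 1 else 2 * p + 1 - i

lemma pvFold_invariant (p : Int) (hp : 0 ≤ p) (n : Nat) :
    (PySem.List.pyRange 0 (n : Int) 1).foldl
      (fun (st : List Int × Int) i =>
        (st.1 ++ [st.2], if i < p then st.2 + 1 else st.2 - 1))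
      ([], 1)
    = ((PySem.List.pyRange 0 (n : Int) 1).map (pvG p), pvG p n) := by
  induction n with
  | zero =>
      simp [PySem.List.pyRange_one_eq_nil (by omega : (0:Int) ≤ 0), pvG]
      omega
  | succ n ih =>
      have h : ((n : Int) + 1) = ((n + 1 : Nat) : Int) := by push_cast; ring
      rw [← h, PySem.List.pyRange_one_succ_right (by omega : (0:Int) ≤ (n:Int)),
        List.foldl_append, List.map_append, ih]
      simp only [List.foldl_cons, List.foldl_nil, List.map_cons, List.map_nil]
      refine Prod.ext rfl ?_
      show _ = pvG p ((n:Int)+1)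
      unfold pvG
      split_ifs <;> omega

-- ===== VERDICT (by name: the statement is the Claim_ definition above) =====
theorem AKSZ_spec : Claim_equal_AKSZ := by
  intro d _
  unfold Spec_AKSZ AKSZ AKSZ_alt
  by_cases hd : d ≤ 0
  · simp [PySem.List.pyRange_one_eq_nil hd]
  · have hp : 0 ≤ PySem.Int.floordiv d 2 := by
      rw [PySem.Int.floordiv_eq_ediv_of_pos (by omega)]; omega
    have hn : d = ((d.toNat : Nat) : Int) := by omega
    rw [hn]
    dsimp only
    rw [pvFold_invariant (PySem.Int.floordiv ((d.toNat : Nat) : Int) 2) (hn ▸ hp) d.toNat]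
    rfl
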